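-- pv_equiv track=rewrite | github.com/SVCE-ACM/A-December-Of_Algorithms-2024 | December 28/python3_BawadharaniSree_Bookshelf_Organizer.py | canOrganizeBooks
-- ===== SOURCE A (Python) =====
-- def canOrganizeBooks(books, shelfSize):
--     # Keep track of the current group size
--     group_count = 0
--
--     # Traverse through each book in the books array
--     for i in range(len(books)):
--         if group_count == 0:  # Start of a new shelf
--             group_count += 1
--         else:
--             if books[i] == books[i-1] + 1:  # Continuation of a valid sequence
--                 group_count += 1
--             else:
--                 return False
--
--         # If a shelf is complete (group size matches shelfSize)
--         if group_count == shelfSize: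
--             group_count = 0  # Reset for next shelf
--
--     # If there are leftover books in a group, it's invalid
--     return group_count == 0
-- ===== SOURCE B (Python) =====
-- def _validShelf(shelf, shelfSize):
--     return all(shelf[j] == shelf[j - 1] + 1 for j in range(1, shelfSize))
--
--
-- def canOrganizeBooks(books, shelfSize):
--     if shelfSize <= 0:
--         return len(books) == 0
--     n = len(books)
--     if n % shelfSize != 0:
--         return False
--     return all(_validShelf(books[start:start + shelfSize], shelfSize)
--                for start in range(0, n, shelfSize))
-- ===== Notes on version B (the rewrite author's own statement) =====
-- stated objective: alternative
-- what changed: Replaces A's single pass with a running group counter (reset when it reaches shelfSize) by an up-front divisibility test followed by explicit chunking: each shelf slice is checked independently for consecutiveness.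
import Mathlib
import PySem

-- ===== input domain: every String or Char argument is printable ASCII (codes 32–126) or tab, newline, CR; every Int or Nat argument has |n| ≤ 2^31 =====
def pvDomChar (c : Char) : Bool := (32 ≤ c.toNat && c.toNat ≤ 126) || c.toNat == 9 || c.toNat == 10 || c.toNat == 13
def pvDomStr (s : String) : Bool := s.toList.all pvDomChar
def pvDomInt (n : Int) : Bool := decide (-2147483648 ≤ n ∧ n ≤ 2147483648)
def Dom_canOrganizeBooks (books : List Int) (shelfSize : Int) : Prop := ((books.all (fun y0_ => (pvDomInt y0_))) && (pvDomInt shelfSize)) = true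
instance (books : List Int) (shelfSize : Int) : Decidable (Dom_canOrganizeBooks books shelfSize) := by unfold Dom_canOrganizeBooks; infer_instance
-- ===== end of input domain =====

-- B replaces A's running group counter by an up-front divisibility test plus independent
-- consecutiveness checks of each shelf-sized chunk (alternative decomposition, same cost).


-- ===== PORT A =====
-- the for-loop of A: iterates over the index range, carrying group_count;
-- books[i] / books[i-1] are read only when group_count ≠ 0, i.e. at i ≥ 1 (always in range),
-- so pyGetD is exact here
def loopA (books : List Int) (shelfSize : Int) : List Int → Int → Bool
  | [], gc => gc == 0
  | i :: rest, gc =>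
    if gc == 0 then
      let g := gc + 1
      if g == shelfSize then loopA books shelfSize rest 0 else loopA books shelfSize rest g
    else
      if PySem.List.pyGetD books i 0 == PySem.List.pyGetD books (i-1) 0 + 1 then
        let g := gc + 1
        if g == shelfSize then loopA books shelfSize rest 0 else loopA books shelfSize rest g
      else false

def canOrganizeBooks (books : List Int) (shelfSize : Int) : Bool :=
  loopA books shelfSize (PySem.List.pyRange 0 (books.length : Int) 1) 0

-- ===== PORT B =====
-- all(shelf[j] == shelf[j-1] + 1 for j in range(1, shelfSize)); indices are in range, pyGetD exact
def validShelf (shelf : List Int) (shelfSize : Int) : Bool :=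
  (PySem.List.pyRange 1 shelfSize 1).all (fun j =>
    PySem.List.pyGetD shelf j 0 == PySem.List.pyGetD shelf (j - 1) 0 + 1)

def canOrganizeBooks_alt (books : List Int) (shelfSize : Int) : Bool :=
  if shelfSize ≤ 0 then books.length == 0
  else
    if PySem.Int.mod (books.length : Int) shelfSize != 0 then false
    else
      (PySem.List.pyRange 0 (books.length : Int) shelfSize).all (fun start =>
        validShelf (PySem.List.slice books (some start) (some (start + shelfSize))) shelfSize)

-- ===== PRECONDITION & SPEC =====
def Spec_canOrganizeBooks (books : List Int) (shelfSize : Int) (out : Bool) : Prop := out = canOrganizeBooks_alt books shelfSize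
instance (books : List Int) (shelfSize : Int) (out : Bool) : Decidable (Spec_canOrganizeBooks books shelfSize out) := by unfold Spec_canOrganizeBooks; infer_instance

-- ===== CLAIM (what is proved, stated in full; the proofs are below) =====
def Claim_equal_canOrganizeBooks : Prop := ∀ (books : List Int) (shelfSize : Int), Dom_canOrganizeBooks books shelfSize → Spec_canOrganizeBooks books shelfSize (canOrganizeBooks books shelfSize)

-- ===== LEMMAS AND PROOFS =====

-- the per-index condition both programs check at index k (an index not at a shelf start)
def chk (books : List Int) (k : Int) : Bool :=
  PySem.List.pyGetD books k 0 == PySem.List.pyGetD books (k - 1) 0 + 1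

-- with a non-positive shelf size the counter can never reach shelfSize, so once gc ≥ 1 A returns False
lemma loopA_nonpos (books : List Int) (s : Int) (hs : s ≤ 0) :
    ∀ (l : List Int) (gc : Int), 1 ≤ gc → loopA books s l gc = false := by
  intro l
  induction l with
  | nil => intro gc hgc; simp [loopA]; omega
  | cons i rest ih =>
    intro gc hgc
    simp only [loopA]
    rw [if_neg (by simp; omega)]
    split
    · rw [if_neg (by simp; omega)]
      exact ih (gc + 1) (by omega)
    · rfl

lemma mod_succ (s i : Int) (hs : 0 < s) :
    (i + 1) % s = if i % s + 1 = s then 0 else i % s + 1 := by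
  have h1 : (i + 1) % s = (i % s + 1) % s := by
    conv_lhs => rw [show i + 1 = (i % s + 1) + s * (i / s) by
      have := Int.emod_add_ediv i s; omega]
    exact Int.add_mul_emod_self_left _ _ _
  have hlt := Int.emod_lt_of_pos i hs
  have hge := Int.emod_nonneg i (by omega : s ≠ 0)
  by_cases h : i % s + 1 = s
  · simp [h1, h]
  · have h2 := Int.emod_eq_of_lt (a := i % s + 1) (b := s) (by omega) (by omega)
    rw [h1, if_neg h, h2]

-- characterisation of A's loop when 0 < s: starting at index i with gc = i % s,
-- the result is "n % s = 0 and every in-shelf index passes chk"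
lemma loopA_char (books : List Int) (s : Int) (hs : 0 < s) (n : Int) :
    ∀ (m : Nat) (i : Int), 0 ≤ i → i + m = n →
    loopA books s (PySem.List.pyRange i n 1) (i % s)
      = (decide (n % s = 0) &&
         (PySem.List.pyRange i n 1).all (fun k => k % s == 0 || chk books k)) := by
  intro m
  induction m with
  | zero =>
    intro i hi hin
    rw [PySem.List.pyRange_one_eq_nil (by omega)]
    have hieq : i = n := by omega
    subst hieq
    simp only [loopA, List.all_nil, Bool.and_true]
    by_cases h : i % s = 0 <;> simp [h]
  | succ m ih =>
    intro i hi hin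
    have hilt : i < n := by omega
    rw [PySem.List.pyRange_one_cons hilt]
    have hrec := ih (i + 1) (by omega) (by push_cast at hin ⊢; omega)
    have hmodsucc := mod_succ s i hs
    have hlt := Int.emod_lt_of_pos i hs
    have hge := Int.emod_nonneg i (by omega : s ≠ 0)
    by_cases h0 : i % s = 0
    · -- start of a shelf: no check at index i
      simp only [loopA, h0]
      rw [if_pos (by decide)]
      by_cases h1 : (0 : Int) + 1 = s
      · rw [if_pos (by simpa using h1)]
        have hnext : (i + 1) % s = 0 := by rw [hmodsucc, h0, if_pos (by omega)]
        rw [hnext] at hrec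
        rw [hrec, List.all_cons]
        simp [h0]
      · rw [if_neg (by simpa using h1)]
        have hnext : (i + 1) % s = 0 + 1 := by rw [hmodsucc, h0, if_neg (by omega)]
        rw [hnext] at hrec
        rw [hrec, List.all_cons]
        simp [h0]
    · -- inside a shelf: index i is checked
      simp only [loopA]
      rw [if_neg (by simp [h0])]
      by_cases hc : chk books i
      · rw [if_pos (by simpa [chk] using hc)]
        by_cases h1 : i % s + 1 = s
        · rw [if_pos (by simpa using h1)]
          have hnext : (i + 1) % s = 0 := by rw [hmodsucc, if_pos h1]
          rw [hnext] at hrec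
          rw [hrec, List.all_cons]
          simp [h0, hc]
        · rw [if_neg (by simpa using h1)]
          have hnext : (i + 1) % s = i % s + 1 := by rw [hmodsucc, if_neg h1]
          rw [hnext] at hrec
          rw [hrec, List.all_cons]
          simp [h0, hc]
      · have hcf : chk books i = false := by simpa using hc
        rw [if_neg (by simpa [chk] using hc)]
        rw [List.all_cons]
        simp [h0, hcf]

-- reading position j of the slice books[a : a+s] is reading position a+j of books
lemma pyGetD_slice (books : List Int) (a b j : Int)
    (ha : 0 ≤ a) (hj : 0 ≤ j) (hjb : a + j < b) (hb : b ≤ (books.length : Int)) :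
    PySem.List.pyGetD (PySem.List.slice books (some a) (some b)) j 0
      = PySem.List.pyGetD books (a + j) 0 := by
  rw [PySem.List.slice_toNat books ha (by omega)]
  have hlen : ((books.drop a.toNat).take (b.toNat - a.toNat)).length = b.toNat - a.toNat := by
    simp; omega
  rw [PySem.List.pyGetD_eq_getElem _ 0 hj (by rw [hlen]; push_cast; omega),
      PySem.List.pyGetD_eq_getElem _ 0 (by omega) (by push_cast; omega)]
  rw [List.getElem_take, List.getElem_drop]
  congr 1
  omega

lemma chunk_le (s st n : Int) (hs : 0 < s) (hdn : s ∣ n) (hdst : s ∣ st) (hlt : st < n) :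
    st + s ≤ n := by
  obtain ⟨u, hu⟩ := hdn
  obtain ⟨v, hv⟩ := hdst
  subst hu hv
  have : v < u := lt_of_mul_lt_mul_left (by linarith) (le_of_lt hs)
  nlinarith

-- B's chunked double loop flattens to the per-index condition of A's loop
lemma chunks_eq_flat (books : List Int) (s : Int) (hs : 0 < s)
    (hd : s ∣ (books.length : Int)) :
    (PySem.List.pyRange 0 (books.length : Int) s).all (fun start =>
        validShelf (PySem.List.slice books (some start) (some (start + s))) s)
      = (PySem.List.pyRange 0 (books.length : Int) 1).all
          (fun k => k % s == 0 || chk books k) := by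
  set n : Int := (books.length : Int) with hn
  have hn0 : 0 ≤ n := by positivity
  refine Bool.eq_iff_iff.mpr ?_
  simp only [List.all_eq_true, validShelf]
  constructor
  · intro h k hk
    rw [PySem.List.mem_pyRange_one] at hk
    by_cases hk0 : k % s = 0
    · simp [hk0]
    · have hge := Int.emod_nonneg k (by omega : s ≠ 0)
      have hlt := Int.emod_lt_of_pos k hs
      set st := s * (k / s) with hst
      set j := k % s with hj
      have hkeq : st + j = k := by rw [hst, hj]; have := Int.emod_add_ediv k s; omega
      have hst0 : 0 ≤ st := by
        have : 0 ≤ k / s := Int.ediv_nonneg (by omega) (by omega)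
        positivity
      have hstlt : st < n := by omega
      have hdst : s ∣ st := ⟨k / s, rfl⟩
      have hb := chunk_le s st n hs hd hdst hstlt
      have hmem : st ∈ PySem.List.pyRange 0 n s := by
        rw [PySem.List.mem_pyRange_iff_of_pos hs]
        exact ⟨by omega, hstlt, by simpa using hdst⟩
      have hinner := h st hmem
      have hjmem : j ∈ PySem.List.pyRange 1 s 1 := by
        rw [PySem.List.mem_pyRange_one]; omega
      have hcheck := hinner j hjmem
      rw [pyGetD_slice books st (st + s) j hst0 (by omega) (by omega) (by omega),
          pyGetD_slice books st (st + s) (j - 1) hst0 (by omega) (by omega) (by omega)] at hcheck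
      have hidx : st + (j - 1) = k - 1 := by omega
      rw [hkeq, hidx] at hcheck
      simp [chk, hcheck]
  · intro h st hst
    rw [PySem.List.mem_pyRange_iff_of_pos hs] at hst
    obtain ⟨hst0, hstlt, hdvd⟩ := hst
    intro j hj
    rw [PySem.List.mem_pyRange_one] at hj
    have hdst : s ∣ st := by simpa using hdvd
    have hb := chunk_le s st n hs hd hdst hstlt
    set k := st + j with hk
    have hkmem : k ∈ PySem.List.pyRange 0 n 1 := by
      rw [PySem.List.mem_pyRange_one]; omega
    have hmod : k % s = j := by
      obtain ⟨v, hv⟩ := hdst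
      rw [hk, hv, add_comm, Int.add_mul_emod_self_left,
          Int.emod_eq_of_lt (by omega) (by omega)]
    have hflat := h k hkmem
    have hne : (k % s == 0) = false := by simp [hmod]; omega
    rw [hne, Bool.false_or] at hflat
    simp only [chk] at hflat
    rw [pyGetD_slice books st (st + s) j hst0 (by omega) (by omega) (by omega),
        pyGetD_slice books st (st + s) (j - 1) hst0 (by omega) (by omega) (by omega)]
    have hidx : st + (j - 1) = k - 1 := by omega
    rw [hidx]
    simpa using hflat

-- ===== VERDICT (by name: the statement is the Claim_ definition above) =====
theorem canOrganizeBooks_spec : Claim_equal_canOrganizeBooks := by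
  intro books s _
  unfold Spec_canOrganizeBooks canOrganizeBooks canOrganizeBooks_alt
  by_cases hs : s ≤ 0
  · rw [if_pos hs]
    cases books with
    | nil => simp [loopA, PySem.List.pyRange_one_eq_nil]
    | cons x xs =>
      rw [PySem.List.pyRange_one_cons (by exact_mod_cast Nat.succ_pos xs.length)]
      simp only [loopA]
      rw [if_pos (by decide), if_neg (by simp; omega)]
      rw [loopA_nonpos _ s hs _ (0 + 1) (by omega)]
      simp
  · replace hs : 0 < s := by omega
    rw [if_neg (by omega)]
    set n : Int := (books.length : Int) with hn
    have hchar := loopA_char books s hs n books.length 0 (le_refl 0) (by simp [hn])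
    rw [Int.zero_emod] at hchar
    rw [hchar, PySem.Int.mod_eq_emod_of_pos hs]
    by_cases hd : n % s = 0
    · rw [if_neg (by simp [hd])]
      rw [chunks_eq_flat books s hs (Int.dvd_of_emod_eq_zero hd), ← hn]
      simp [hd]
    · rw [if_pos (by simp [hd])]
      simp [hd]
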